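-- pv_equiv track=rewrite | github.com/rahulsa123/Project-euler | problem110.py | f
-- ===== SOURCE A (Python) =====
-- def f(n):
--     while(n%3==0):
--         n//=3
--     while(n%5==0):
--         n//=5
--     while(n%7==0):
--         n//=7
--     while(n%11==0):
--         n//=11
--     return True if n==1 else False
-- ===== SOURCE B (Python) =====
-- def f(n):
--     # n is 3/5/7/11-smooth iff n is positive and n divides 1155^k for any
--     # k >= bit_length(n) (each prime exponent in n is < bit_length(n)).
--     return n > 0 and pow(1155, n.bit_length(), n) == 0
-- ===== Notes on version B (the rewrite author's own statement) =====
-- stated objective: simpler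
-- what changed: Replaces the four trial-division while-loops by the single divisibility test n | 1155^bit_length(n), computed with one modular exponentiation; Pre_ excludes n = 0, on which A loops forever (0 % 3 == 0 and 0 // 3 == 0), while B returns False.
-- outside the precondition, e.g. on f(0): A does not finish within the time limit, B returns False
import Mathlib
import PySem

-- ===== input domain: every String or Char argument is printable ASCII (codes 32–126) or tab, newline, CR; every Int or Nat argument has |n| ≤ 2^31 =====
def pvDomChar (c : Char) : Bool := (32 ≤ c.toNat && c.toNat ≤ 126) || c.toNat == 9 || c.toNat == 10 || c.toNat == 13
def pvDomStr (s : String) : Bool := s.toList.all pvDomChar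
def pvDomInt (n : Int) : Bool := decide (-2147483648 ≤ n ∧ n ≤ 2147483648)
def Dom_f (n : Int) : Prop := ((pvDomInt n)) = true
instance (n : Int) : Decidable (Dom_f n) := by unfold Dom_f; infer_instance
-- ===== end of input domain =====

-- B replaces A's four prime-peeling while-loops by one test 'n > 0 and n divides 1155^bit_length(n)'
-- (objective: simpler); Pre_f excludes n = 0, on which A's first while-loop never terminates.


-- ===== PORT A =====
-- 'while n % p == 0: n //= p' as fuel recursion; fuel = |n| reaches the loop's exit for every n ≠ 0
-- (each pass divides |n| by p ≥ 2), and n = 0 — where the Python loop never exits — is outside Pre_f.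
def stripA : Nat → Int → Int → Int
  | 0, _, n => n
  | fuel+1, p, n =>
      if PySem.Int.mod n p = 0 then stripA fuel p (PySem.Int.floordiv n p) else n

def f (n : Int) : Bool :=
  let n1 := stripA n.natAbs 3 n
  let n2 := stripA n1.natAbs 5 n1
  let n3 := stripA n2.natAbs 7 n2
  let n4 := stripA n3.natAbs 11 n3
  if n4 = 1 then true else false

-- ===== PORT B =====
-- 'return n > 0 and pow(1155, n.bit_length(), n) == 0'
def f_alt (n : Int) : Bool :=
  decide (0 < n) && decide (PySem.Int.powMod 1155 (PySem.Int.bitLength n) n = 0)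

-- ===== PRECONDITION & SPEC =====
-- Pre_f excludes only n = 0, on which the Python A diverges (0 % 3 == 0 and 0 // 3 == 0 forever).
def Pre_f (n : Int) : Prop := n ≠ 0
instance (n : Int) : Decidable (Pre_f n) := by unfold Pre_f; infer_instance
def pvWitness_f : Int := (1155)
def Spec_f (n : Int) (out : Bool) : Prop := out = f_alt n
instance (n : Int) (out : Bool) : Decidable (Spec_f n out) := by unfold Spec_f; infer_instance

-- ===== CLAIM (what is proved, stated in full; the proofs are below) =====
def Claim_equal_f : Prop := ∀ (n : Int), Dom_f n → Pre_f n → Spec_f n (f n)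

-- ===== LEMMAS AND PROOFS =====

-- the common characterisation: n is positive and every prime factor of n is 3, 5, 7 or 11
def Sm (n : Int) : Prop :=
  0 < n ∧ ∀ p : ℕ, p.Prime → (p : ℤ) ∣ n → p = 3 ∨ p = 5 ∨ p = 7 ∨ p = 11

theorem prime_dvd_1155 {p : ℕ} (hp : p.Prime) (hd : p ∣ 1155) :
    p = 3 ∨ p = 5 ∨ p = 7 ∨ p = 11 := by
  have h : p ∣ 3 * (5 * (7 * 11)) := by norm_num at hd ⊢; exact hd
  rcases (Nat.Prime.dvd_mul hp).mp h with h3 | h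
  · exact Or.inl ((Nat.prime_dvd_prime_iff_eq hp (by norm_num)).mp h3)
  rcases (Nat.Prime.dvd_mul hp).mp h with h5 | h
  · exact Or.inr (Or.inl ((Nat.prime_dvd_prime_iff_eq hp (by norm_num)).mp h5))
  rcases (Nat.Prime.dvd_mul hp).mp h with h7 | h11
  · exact Or.inr (Or.inr (Or.inl ((Nat.prime_dvd_prime_iff_eq hp (by norm_num)).mp h7)))
  · exact Or.inr (Or.inr (Or.inr ((Nat.prime_dvd_prime_iff_eq hp (by norm_num)).mp h11)))

theorem stripA_spec (fuel : Nat) (p : Int) (hp : 1 < p) :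
    ∀ n : Int, n ≠ 0 → n.natAbs ≤ fuel →
      ∃ k : ℕ, n = p ^ k * stripA fuel p n ∧ ¬ p ∣ stripA fuel p n := by
  induction fuel with
  | zero => intro n hn habs; exact absurd (by omega : n = 0) hn
  | succ fuel IH =>
    intro n hn habs
    by_cases h : PySem.Int.mod n p = 0
    · have hdvd : p ∣ n := (PySem.Int.mod_eq_zero_iff_dvd n p).mp h
      have heq : n = PySem.Int.floordiv n p * p := by
        have := PySem.Int.floordiv_mul_add_mod n p
        omega
      set n' := PySem.Int.floordiv n p with hn'
      have hne' : n' ≠ 0 := by intro h0; rw [h0, zero_mul] at heq; exact hn heq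
      have habs' : n'.natAbs < n.natAbs := by
        have hmul : n.natAbs = n'.natAbs * p.natAbs := by rw [heq, Int.natAbs_mul]
        have h2 : n'.natAbs * 2 ≤ n'.natAbs * p.natAbs :=
          Nat.mul_le_mul_left _ (by omega)
        omega
      obtain ⟨k, hk, hnd⟩ := IH n' hne' (by omega)
      refine ⟨k + 1, ?_, ?_⟩
      · show n = p ^ (k + 1) * stripA (fuel + 1) p n
        simp only [stripA, if_pos h, ← hn']
        rw [pow_succ]
        calc n = n' * p := heq
          _ = p ^ k * stripA fuel p n' * p := by rw [← hk]
          _ = p ^ k * p * stripA fuel p n' := by ring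
      · show ¬ p ∣ stripA (fuel + 1) p n
        simp only [stripA, if_pos h, ← hn']
        exact hnd
    · refine ⟨0, ?_, ?_⟩
      · show n = p ^ 0 * stripA (fuel + 1) p n
        simp only [stripA, if_neg h]; ring
      · show ¬ p ∣ stripA (fuel + 1) p n
        simp only [stripA, if_neg h]
        exact fun hd => h ((PySem.Int.mod_eq_zero_iff_dvd n p).mpr hd)

theorem A_char (n : Int) (hn : n ≠ 0) : f n = true ↔ Sm n := by
  obtain ⟨a, hA, hnd3⟩ := stripA_spec n.natAbs 3 (by norm_num) n hn le_rfl
  set n1 := stripA n.natAbs 3 n with h1def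
  have h1 : n1 ≠ 0 := by intro h0; rw [h0, mul_zero] at hA; exact hn hA
  obtain ⟨b, hB, hnd5⟩ := stripA_spec n1.natAbs 5 (by norm_num) n1 h1 le_rfl
  set n2 := stripA n1.natAbs 5 n1 with h2def
  have h2 : n2 ≠ 0 := by intro h0; rw [h0, mul_zero] at hB; exact h1 hB
  obtain ⟨c, hC, hnd7⟩ := stripA_spec n2.natAbs 7 (by norm_num) n2 h2 le_rfl
  set n3 := stripA n2.natAbs 7 n2 with h3def
  have h3 : n3 ≠ 0 := by intro h0; rw [h0, mul_zero] at hC; exact h2 hC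
  obtain ⟨d, hD, hnd11⟩ := stripA_spec n3.natAbs 11 (by norm_num) n3 h3 le_rfl
  set n4 := stripA n3.natAbs 11 n3 with h4def
  have h4 : n4 ≠ 0 := by intro h0; rw [h0, mul_zero] at hD; exact h3 hD
  have hd41 : n4 ∣ n1 := (Dvd.intro_left _ hD.symm).trans
    ((Dvd.intro_left _ hC.symm).trans (Dvd.intro_left _ hB.symm))
  have hd42 : n4 ∣ n2 := (Dvd.intro_left _ hD.symm).trans (Dvd.intro_left _ hC.symm)
  have hd43 : n4 ∣ n3 := Dvd.intro_left _ hD.symm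
  have hd4n : n4 ∣ n := by
    refine hd41.trans (Dvd.intro_left _ hA.symm)
  have hf : f n = true ↔ n4 = 1 := by
    simp only [f, ← h1def, ← h2def, ← h3def, ← h4def]
    split_ifs with h <;> simp [h]
  rw [hf]
  constructor
  · intro h41
    rw [h41] at hD
    constructor
    · rw [hA, hB, hC, hD]; positivity
    · intro p hp hdvd
      have hip : Prime (p : ℤ) := Int.prime_iff_natAbs_prime.mpr (by simpa)
      rw [hA] at hdvd
      rcases hip.dvd_mul.mp hdvd with h' | hdvd
      · exact Or.inl (by
          have : (p : ℤ) ∣ 3 := hip.dvd_of_dvd_pow h'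
          have : p ∣ 3 := by exact_mod_cast this
          exact (Nat.prime_dvd_prime_iff_eq hp (by norm_num)).mp this)
      rw [hB] at hdvd
      rcases hip.dvd_mul.mp hdvd with h' | hdvd
      · exact Or.inr (Or.inl (by
          have : (p : ℤ) ∣ 5 := hip.dvd_of_dvd_pow h'
          have : p ∣ 5 := by exact_mod_cast this
          exact (Nat.prime_dvd_prime_iff_eq hp (by norm_num)).mp this))
      rw [hC] at hdvd
      rcases hip.dvd_mul.mp hdvd with h' | hdvd
      · exact Or.inr (Or.inr (Or.inl (by
          have : (p : ℤ) ∣ 7 := hip.dvd_of_dvd_pow h'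
          have : p ∣ 7 := by exact_mod_cast this
          exact (Nat.prime_dvd_prime_iff_eq hp (by norm_num)).mp this)))
      rw [hD] at hdvd
      rcases hip.dvd_mul.mp hdvd with h' | hdvd
      · exact Or.inr (Or.inr (Or.inr (by
          have : (p : ℤ) ∣ 11 := hip.dvd_of_dvd_pow h'
          have : p ∣ 11 := by exact_mod_cast this
          exact (Nat.prime_dvd_prime_iff_eq hp (by norm_num)).mp this)))
      · exact absurd hdvd hip.not_dvd_one
  · rintro ⟨hpos, hpr⟩
    by_contra h41
    have hpos4 : 0 < n4 := by
      rcases lt_trichotomy n4 0 with hlt | heq0 | hgt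
      · exfalso
        have hQ : (0:ℤ) < 3 ^ a * (5 ^ b * (7 ^ c * 11 ^ d)) := by positivity
        have : n = 3 ^ a * (5 ^ b * (7 ^ c * 11 ^ d)) * n4 := by
          rw [hA, hB, hC, hD]; ring
        nlinarith
      · exact absurd heq0 h4
      · exact hgt
    have habs1 : n4.natAbs ≠ 1 := by omega
    obtain ⟨p, hp, hpd⟩ := Nat.exists_prime_and_dvd habs1
    have hpd4 : (p : ℤ) ∣ n4 := by
      rwa [Int.natCast_dvd]
    have : p = 3 ∨ p = 5 ∨ p = 7 ∨ p = 11 := hpr p hp (hpd4.trans hd4n)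
    rcases this with h' | h' | h' | h' <;> subst h'
    · exact hnd3 (hpd4.trans hd41)
    · exact hnd5 (hpd4.trans hd42)
    · exact hnd7 (hpd4.trans hd43)
    · exact hnd11 hpd4

theorem smooth_dvd (m : ℕ) :
    0 < m → (∀ p : ℕ, p.Prime → p ∣ m → p = 3 ∨ p = 5 ∨ p = 7 ∨ p = 11) →
    ∀ K : ℕ, m ≤ 2 ^ K → m ∣ 1155 ^ K := by
  induction m using Nat.strong_induction_on with
  | _ m IH =>
    intro hm hpr K hK
    by_cases hm1 : m = 1
    · subst hm1; exact one_dvd _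
    obtain ⟨p, hp, hpd⟩ := Nat.exists_prime_and_dvd hm1
    have hpdm : p ∣ m := hpd
    have hp1155 : p ∣ 1155 := by
      rcases hpr p hp hpd with h | h | h | h <;> subst h <;> norm_num
    have hp3 : 3 ≤ p := by
      rcases hpr p hp hpd with h | h | h | h <;> omega
    obtain ⟨m', hm'⟩ := hpd
    have hm'pos : 0 < m' := by
      rcases Nat.eq_zero_or_pos m' with h0 | h; · subst h0; omega
      · exact h
    have hm'lt : m' < m := by
      have : m' * 3 ≤ m' * p := Nat.mul_le_mul_left _ hp3
      nlinarith
    have hK1 : 1 ≤ K := by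
      by_contra hK0
      have : K = 0 := by omega
      subst this
      simp at hK
      have : 2 ≤ m := by
        have := hp.two_le
        have : p ≤ m := Nat.le_of_dvd hm hpdm
        omega
      omega
    have hm'K : m' ≤ 2 ^ (K - 1) := by
      have h2 : 2 * m' ≤ p * m' := Nat.mul_le_mul_right _ (by omega)
      have hpow : 2 ^ K = 2 * 2 ^ (K - 1) := by
        rw [← pow_succ']
        congr 1
        omega
      omega
    have hpr' : ∀ q : ℕ, q.Prime → q ∣ m' → q = 3 ∨ q = 5 ∨ q = 7 ∨ q = 11 :=
      fun q hq hqd => hpr q hq (hqd.trans (Dvd.intro_left p hm'.symm))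
    have hIH : m' ∣ 1155 ^ (K - 1) := IH m' hm'lt hm'pos hpr' (K - 1) hm'K
    have : m = p * m' := hm'
    rw [this]
    have hpow : (1155 : ℕ) ^ K = 1155 * 1155 ^ (K - 1) := by
      rw [← pow_succ']
      congr 1
      omega
    rw [hpow]
    exact mul_dvd_mul hp1155 hIH

theorem B_char (n : Int) (_hn : n ≠ 0) : f_alt n = true ↔ Sm n := by
  have hunf : f_alt n = true ↔ 0 < n ∧ n ∣ (1155 : ℤ) ^ PySem.Int.bitLength n := by
    simp only [f_alt, PySem.Int.powMod, Bool.and_eq_true, decide_eq_true_eq,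
      PySem.Int.mod_eq_zero_iff_dvd]
  rw [hunf]
  constructor
  · rintro ⟨hpos, hdvd⟩
    refine ⟨hpos, fun p hp hpn => ?_⟩
    have hppow : (p : ℤ) ∣ ((1155 : ℕ) : ℤ) ^ PySem.Int.bitLength n := by
      exact_mod_cast hpn.trans hdvd
    have : p ∣ (1155 : ℕ) ^ PySem.Int.bitLength n := by
      rwa [← Nat.cast_pow, Int.natCast_dvd_natCast] at hppow
    exact prime_dvd_1155 hp (hp.dvd_of_dvd_pow this)
  · rintro ⟨hpos, hpr⟩
    refine ⟨hpos, ?_⟩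
    have hm : n.natAbs ∣ (1155 : ℕ) ^ PySem.Int.bitLength n := by
      refine smooth_dvd n.natAbs (by omega)
        (fun p hp hpd => hpr p hp (by rwa [Int.natCast_dvd])) _ ?_
      exact le_of_lt (PySem.Int.lt_two_pow_bitLength n)
    have hd1 : n ∣ (n.natAbs : ℤ) := Int.dvd_natAbs.mpr dvd_rfl
    have hd2 : (n.natAbs : ℤ) ∣ (1155 : ℤ) ^ PySem.Int.bitLength n := by
      exact_mod_cast Int.natCast_dvd_natCast.mpr hm
    exact hd1.trans hd2

-- ===== VERDICT (by name: the statement is the Claim_ definition above) =====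
theorem f_spec : Claim_equal_f := by
  intro n _ hpre
  show f n = f_alt n
  have hA := A_char n hpre
  have hB := B_char n hpre
  cases hb : f_alt n with
  | true => exact hA.mpr (hB.mp hb)
  | false =>
    cases hf : f n with
    | false => rfl
    | true => rw [← hb, hB.mpr (hA.mp hf)]
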